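-- pv_equiv track=rewrite | github.com/saleor/saleor | tutorial-env/lib/python3.6/site-packages/graphql/language/lexer.py | position_after_whitespace
-- ===== SOURCE A (Python) =====
-- def char_code_at(s, pos):
--     # type: (str, int) -> Optional[int]
--     if 0 <= pos < len(s):
--         return ord(s[pos])
--
--     return None
--
-- ignored_whitespace_characters = frozenset(
--     [
--         # BOM
--         0xFEFF,
--         # White Space
--         0x0009,  # tab
--         0x0020,  # space
--         # Line Terminator
--         0x000A,  # new line
--         0x000D,  # carriage return
--         # Comma
--         0x002C,
--     ]
-- )
--
-- def position_after_whitespace(body, start_position):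
--     # type: (str, int) -> int
--     """Reads from body starting at start_position until it finds a
--     non-whitespace or commented character, then returns the position of
--     that character for lexing."""
--     body_length = len(body)
--     position = start_position
--     while position < body_length:
--         code = char_code_at(body, position)
--         if code in ignored_whitespace_characters:
--             position += 1
--
--         elif code == 35:  # #, skip comments
--             position += 1
--             while position < body_length:
--                 code = char_code_at(body, position)
--                 if not (
--                     code is not None
--                     and (code > 0x001F or code == 0x0009)
--                     and code not in (0x000A, 0x000D)
--                 ):
--                     break
--
--                 position += 1
--         else:
--             break
--     return position
-- ===== SOURCE B (Python) =====
-- WS = frozenset("\ufeff\t \n\r,")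
--
-- def position_after_whitespace(body, start_position):
--     """Skips ignored characters; a '#' comment is skipped in one jump to the
--     next line terminator using str.find instead of a per-character inner loop
--     (exact on printable-ASCII/tab/newline/CR input)."""
--     n = len(body)
--     pos = start_position
--     while 0 <= pos < n:
--         ch = body[pos]
--         if ch == '#':
--             nl = body.find('\n', pos + 1)
--             cr = body.find('\r', pos + 1)
--             if nl == -1:
--                 nl = n
--             if cr == -1:
--                 cr = n
--             pos = min(nl, cr)
--         elif ch in WS:
--             pos += 1
--         else:
--             return pos
--     return pos
-- ===== Notes on version B (the rewrite author's own statement) =====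
-- stated objective: alternative
-- what changed: A's inner per-character comment loop is removed: B skips a '#' comment in one jump to the next line terminator computed with str.find, and drives a single guarded loop over positions; equivalence holds on the printable-ASCII/tab/newline/CR domain where a comment ends exactly at \n or \r.
import Mathlib
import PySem

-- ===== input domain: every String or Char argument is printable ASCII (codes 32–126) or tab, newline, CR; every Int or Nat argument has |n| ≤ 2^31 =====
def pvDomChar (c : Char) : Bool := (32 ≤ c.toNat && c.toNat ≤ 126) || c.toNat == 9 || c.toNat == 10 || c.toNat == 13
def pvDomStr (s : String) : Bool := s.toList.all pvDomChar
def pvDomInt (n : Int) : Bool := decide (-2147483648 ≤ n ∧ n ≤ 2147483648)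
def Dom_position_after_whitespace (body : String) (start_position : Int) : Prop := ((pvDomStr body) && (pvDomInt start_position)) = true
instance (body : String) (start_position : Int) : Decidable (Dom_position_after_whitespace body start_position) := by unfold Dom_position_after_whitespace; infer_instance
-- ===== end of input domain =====

-- B removes A's inner per-character comment loop: a '#' comment is skipped in one
-- jump to the next line terminator found with str.find (objective: alternative).
-- Both loops are ported with a fuel parameter that strictly dominates the number
-- of remaining iterations, so the fuel-0 branch is never reached.

-- ===== PORT A =====
-- char_code_at, exact: some (ord s[pos]) iff 0 ≤ pos < len(s), else none
def charCodeAt (s : List Char) (pos : Int) : Option Int :=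
  if 0 ≤ pos ∧ pos < s.length then
    match s[pos.toNat]? with
    | some c => some ((Char.toNat c) : Int)
    | none => none
  else none

-- inner `while` of A: skip the comment body (advances by 1 per step, so
-- (len - position).toNat + 1 fuel at the call site is never exhausted)
def pawInner (chars : List Char) (len : Int) : Nat → Int → Int
  | 0, position => position
  | fuel + 1, position =>
    if position < len then
      if (match charCodeAt chars position with
          | some c => ((c > 0x1F || c == 0x09) && c ≠ 0x0A && c ≠ 0x0D)
          | none => false) then
        pawInner chars len fuel (position + 1)
      else position
    else position

-- outer `while` of A (each iteration advances position by at least 1)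
def pawOuter (chars : List Char) (len : Int) : Nat → Int → Int
  | 0, position => position
  | fuel + 1, position =>
    if position < len then
      if charCodeAt chars position = some 0xFEFF ∨ charCodeAt chars position = some 0x09 ∨ charCodeAt chars position = some 0x20 ∨
         charCodeAt chars position = some 0x0A ∨ charCodeAt chars position = some 0x0D ∨ charCodeAt chars position = some 0x2C then
        pawOuter chars len fuel (position + 1)
      else if charCodeAt chars position = some 35 then
        pawOuter chars len fuel (pawInner chars len ((len - position).toNat + 1) (position + 1))
      else position
    else position

def position_after_whitespace (body : String) (start_position : Int) : Int :=
  pawOuter body.toList (body.toList.length : Int)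
    ((body.toList.length - start_position).toNat + 1) start_position

-- ===== PORT B =====
-- `if x == -1: x = n` applied to a str.find result
def orLen (len : Int) (x : Int) : Int := if x = -1 then len else x

-- single flat loop of B: whitespace advances by one, a comment jumps via find
-- (each iteration advances position by at least 1, so the same fuel bound works)
def pawAlt (chars : List Char) : Nat → Int → Int
  | 0, pos => pos
  | fuel + 1, pos =>
    if 0 ≤ pos ∧ pos < (chars.length : Int) then
      match chars[pos.toNat]? with
      | none => pos
      | some c =>
        if c = '#' then
          let nl := orLen (chars.length : Int) (PySem.Chars.findFrom chars ['\n'] (pos + 1) none)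
          let cr := orLen (chars.length : Int) (PySem.Chars.findFrom chars ['\r'] (pos + 1) none)
          pawAlt chars fuel (min nl cr)
        else if c = '\uFEFF' ∨ c = '\t' ∨ c = ' ' ∨ c = '\n' ∨ c = '\r' ∨ c = ',' then
          pawAlt chars fuel (pos + 1)
        else pos
    else pos

def position_after_whitespace_alt (body : String) (start_position : Int) : Int :=
  pawAlt body.toList ((body.toList.length - start_position).toNat + 1) start_position

-- ===== PRECONDITION & SPEC =====
def Spec_position_after_whitespace (body : String) (start_position : Int) (out : Int) : Prop := out = position_after_whitespace_alt body start_position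
instance (body : String) (start_position : Int) (out : Int) : Decidable (Spec_position_after_whitespace body start_position out) := by unfold Spec_position_after_whitespace; infer_instance

-- ===== CLAIM (what is proved, stated in full; the proofs are below) =====
def Claim_equal_position_after_whitespace : Prop := ∀ (body : String) (start_position : Int), Dom_position_after_whitespace body start_position → Spec_position_after_whitespace body start_position (position_after_whitespace body start_position)

-- ===== LEMMAS AND PROOFS =====

theorem char_eq_of_toNat {c d : Char} (h : c.toNat = d.toNat) : c = d := by
  have h1 := Char.ofNat_toNat c
  rw [h, Char.ofNat_toNat] at h1
  exact h1.symm

theorem char_of_code {c : Char} {z : Int} (hcz : (c.toNat : Int) = z) (d : Char)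
    (hd : (d.toNat : Int) = z) : c = d :=
  char_eq_of_toNat (by omega)

theorem singleton_prefix_iff {x : Char} {l : List Char} : [x] <+: l ↔ ∃ t, l = x :: t := by
  cases l with
  | nil => simp
  | cons a t =>
    constructor
    · intro h; obtain ⟨s, hs⟩ := h; simp at hs; exact ⟨t, by simp [hs.1]⟩
    · rintro ⟨t', ht⟩; simp at ht; exact ⟨t', by simp [ht.1, ht.2]⟩

theorem singleton_infix_iff {x : Char} {l : List Char} : [x] <:+: l ↔ x ∈ l := by
  constructor
  · intro h; exact List.singleton_sublist.mp h.sublist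
  · intro h; obtain ⟨s, t, hst⟩ := List.append_of_mem h
    exact ⟨s, t, by simp [hst]⟩

-- a single-character str.find is List.findIdx
theorem find_single (s : List Char) (x : Char) :
    PySem.Chars.find s [x] = if x ∈ s then ((s.findIdx (· == x) : Nat) : Int) else -1 := by
  split
  · rename_i hmem
    have hnn : 0 ≤ PySem.Chars.find s [x] :=
      (PySem.Chars.find_nonneg_iff s [x]).mpr (singleton_infix_iff.mpr hmem)
    obtain ⟨hpre, hmin⟩ := PySem.Chars.find_spec (s := s) (sub := [x]) hnn
    set n := (PySem.Chars.find s [x]).toNat with hn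
    obtain ⟨t, ht⟩ := singleton_prefix_iff.mp hpre
    have hlt : n < s.length := by
      by_contra hge
      rw [List.drop_eq_nil_of_le (by omega)] at ht; simp at ht
    have hfi : s.findIdx (· == x) = n := by
      rw [List.findIdx_eq hlt]
      constructor
      · have h0 : s[n] = x := by
          rw [List.drop_eq_getElem_cons hlt] at ht
          exact (List.cons.injEq _ _ _ _ ▸ ht).1
        simp [h0]
      · intro j hj
        have hjl : j < s.length := by omega
        have hne := hmin j hj
        simp only [beq_eq_false_iff_ne, ne_eq]
        intro hpj
        apply hne
        rw [List.drop_eq_getElem_cons hjl, hpj]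
        exact ⟨s.drop (j+1), rfl⟩
    rw [hfi]; omega
  · rename_i hmem
    exact (PySem.Chars.find_eq_neg_one_iff s [x]).mpr (fun h => hmem (singleton_infix_iff.mp h))

-- common characterisation of "where a comment ends": index of the first line
-- terminator at index ≥ j, else the length
def stopAt (chars : List Char) (j : Nat) : Int :=
  (j + (chars.drop j).findIdx (fun c => c == '\n' || c == '\r') : Int)

theorem findIdx_min {α : Type} (p q : α → Bool) (l : List α) :
    min (l.findIdx p) (l.findIdx q) = l.findIdx (fun a => p a || q a) := by
  induction l with
  | nil => simp
  | cons a t ih =>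
    simp only [List.findIdx_cons]
    cases hp : p a <;> cases hq : q a <;> simp [hp, hq] <;> omega

theorem orLen_findFrom (chars : List Char) (x : Char) (k : Nat) (hk : k ≤ chars.length) :
    orLen (chars.length : Int) (PySem.Chars.findFrom chars [x] (k : Int) none) =
      (k : Int) + (((chars.drop k).findIdx (· == x) : Nat) : Int) := by
  rw [PySem.Chars.findFrom_natCast chars [x] k hk, find_single (chars.drop k) x]
  by_cases hmem : x ∈ chars.drop k
  · rw [if_pos hmem]
    have hlt : (chars.drop k).findIdx (· == x) < (chars.drop k).length :=
      List.findIdx_lt_length_of_exists ⟨x, hmem, by simp⟩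
    rw [if_neg (by omega)]
    unfold orLen
    rw [if_neg (by omega)]
  · rw [if_neg hmem, if_pos rfl]
    unfold orLen
    rw [if_pos rfl]
    have hfi : (chars.drop k).findIdx (· == x) = (chars.drop k).length := by
      rw [List.findIdx_eq_length]
      intro a ha
      simp only [beq_eq_false_iff_ne, ne_eq]
      intro h; exact hmem (h ▸ ha)
    rw [hfi, List.length_drop]
    omega

theorem min_orLen_eq_stopAt (chars : List Char) (k : Nat) (hk : k ≤ chars.length) :
    min (orLen (chars.length : Int) (PySem.Chars.findFrom chars ['\n'] (k : Int) none))
        (orLen (chars.length : Int) (PySem.Chars.findFrom chars ['\r'] (k : Int) none)) =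
      stopAt chars k := by
  rw [orLen_findFrom chars '\n' k hk, orLen_findFrom chars '\r' k hk]
  have h := findIdx_min (fun c => c == '\n') (fun c => c == '\r') (chars.drop k)
  unfold stopAt
  omega

theorem charCodeAt_cases {chars : List Char} {p : Int} {z : Int}
    (h : charCodeAt chars p = some z) :
    0 ≤ p ∧ p < (chars.length : Int) ∧ ∃ c, chars[p.toNat]? = some c ∧ (c.toNat : Int) = z := by
  unfold charCodeAt at h
  split at h
  · rename_i hin
    refine ⟨hin.1, hin.2, ?_⟩
    cases hg : chars[p.toNat]? with
    | none => rw [hg] at h; simp at h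
    | some c => rw [hg] at h; simp at h; exact ⟨c, rfl, by omega⟩
  · simp at h

theorem charCodeAt_eq (chars : List Char) (p : Int) (h0 : 0 ≤ p) (h1 : p < (chars.length : Int))
    (c : Char) (hg : chars[p.toNat]? = some c) :
    charCodeAt chars p = some ((c.toNat : Nat) : Int) := by
  unfold charCodeAt
  rw [if_pos ⟨h0, h1⟩, hg]

theorem charCodeAt_none {chars : List Char} {p : Int}
    (h : ¬ (0 ≤ p ∧ p < (chars.length : Int))) : charCodeAt chars p = none := by
  unfold charCodeAt
  rw [if_neg h]

-- A's inner comment loop computes stopAt on domain characters, given enough fuel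
theorem pawInner_eq (chars : List Char) (hDom : chars.all pvDomChar = true) :
    ∀ (fuel : Nat) (j : Nat), j ≤ chars.length → chars.length - j < fuel →
      pawInner chars (chars.length : Int) fuel (j : Int) = stopAt chars j := by
  intro fuel
  induction fuel with
  | zero => intro j _ hf; omega
  | succ f ih =>
    intro j hj hf
    by_cases hlt : j < chars.length
    · have hg : chars[j]? = some (chars[j]'hlt) := List.getElem?_eq_getElem hlt
      set c := chars[j]'hlt with hc
      have hdc : pvDomChar c = true := List.all_eq_true.mp hDom c (List.getElem_mem hlt)
      have hcode : charCodeAt chars (j : Int) = some ((c.toNat : Nat) : Int) :=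
        charCodeAt_eq chars (j : Int) (by omega) (by omega) c (by simpa using hg)
      rw [pawInner, if_pos (by omega), hcode]
      simp only [pvDomChar, Bool.or_eq_true, Bool.and_eq_true, decide_eq_true_eq, beq_iff_eq] at hdc
      by_cases hnr : c = '\n' ∨ c = '\r'
      · have h10 : c.toNat = 10 ∨ c.toNat = 13 := by
          rcases hnr with h | h <;> rw [h] <;> [left; right] <;> rfl
        rw [if_neg (by simp only [Bool.and_eq_true, Bool.or_eq_true, decide_eq_true_eq, beq_iff_eq]; omega)]
        unfold stopAt
        rw [List.drop_eq_getElem_cons hlt, List.findIdx_cons]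
        have hp : ((chars[j]'hlt == '\n' || chars[j]'hlt == '\r') : Bool) = true := by
          rcases hnr with h | h <;> rw [← hc, h] <;> simp
        rw [hp]
        simp
      · have hne10 : c.toNat ≠ 10 := fun h => hnr (Or.inl (char_eq_of_toNat (by rw [h]; rfl)))
        have hne13 : c.toNat ≠ 13 := fun h => hnr (Or.inr (char_eq_of_toNat (by rw [h]; rfl)))
        rw [if_pos (by simp only [Bool.and_eq_true, Bool.or_eq_true, decide_eq_true_eq, beq_iff_eq]; omega)]
        have hcast : ((j : Int) + 1) = (((j + 1 : Nat) : Nat) : Int) := by omega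
        rw [hcast, ih (j + 1) (by omega) (by omega)]
        unfold stopAt
        rw [List.drop_eq_getElem_cons hlt, List.findIdx_cons]
        have hp : ((chars[j]'hlt == '\n' || chars[j]'hlt == '\r') : Bool) = false := by
          rw [← hc]
          simp only [Bool.or_eq_false_iff, beq_eq_false_iff_ne, ne_eq]
          exact ⟨fun h => hnr (Or.inl h), fun h => hnr (Or.inr h)⟩
        rw [hp]
        simp
        omega
    · rw [pawInner, if_neg (by omega)]
      have hj' : j = chars.length := by omega
      subst hj'
      simp [stopAt, List.drop_length]

-- one step of B's loop at an in-range position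
theorem pawAlt_step (chars : List Char) (f : Nat) (pos : Int) (h0 : 0 ≤ pos)
    (h1 : pos < (chars.length : Int)) (c : Char) (hg : chars[pos.toNat]? = some c) :
    pawAlt chars (f + 1) pos =
      (if c = '#' then
        pawAlt chars f (min (orLen (chars.length : Int) (PySem.Chars.findFrom chars ['\n'] (pos + 1) none))
                            (orLen (chars.length : Int) (PySem.Chars.findFrom chars ['\r'] (pos + 1) none)))
      else if c = '\uFEFF' ∨ c = '\t' ∨ c = ' ' ∨ c = '\n' ∨ c = '\r' ∨ c = ',' then
        pawAlt chars f (pos + 1)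
      else pos) := by
  rw [pawAlt, if_pos (show (0:Int) ≤ pos ∧ pos < (chars.length : Int) from ⟨h0, h1⟩), hg]

-- main: A's outer loop equals B's flat loop step for step (they advance through
-- the same positions, so the same fuel drives both)
theorem paw_main (chars : List Char) (hDom : chars.all pvDomChar = true) :
    ∀ (fuel : Nat) (pos : Int),
      pawOuter chars (chars.length : Int) fuel pos = pawAlt chars fuel pos := by
  intro fuel
  induction fuel with
  | zero => intro pos; rfl
  | succ f ih =>
    intro pos
    by_cases hin : 0 ≤ pos ∧ pos < (chars.length : Int)
    · obtain ⟨h0, hlt⟩ := hin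
      obtain ⟨c, hg⟩ : ∃ c, chars[pos.toNat]? = some c :=
        ⟨_, List.getElem?_eq_getElem (by omega)⟩
      have hcode : charCodeAt chars pos = some ((c.toNat : Nat) : Int) :=
        charCodeAt_eq chars pos h0 hlt c hg
      rw [pawOuter, if_pos hlt, pawAlt_step chars f pos h0 hlt c hg]
      by_cases hcw : c = '\uFEFF' ∨ c = '\t' ∨ c = ' ' ∨ c = '\n' ∨ c = '\r' ∨ c = ','
      · have hch : c ≠ '#' := by
          rcases hcw with h2 | h2 | h2 | h2 | h2 | h2 <;> subst h2 <;> decide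
        have hws : charCodeAt chars pos = some 0xFEFF ∨ charCodeAt chars pos = some 0x09 ∨
            charCodeAt chars pos = some 0x20 ∨ charCodeAt chars pos = some 0x0A ∨
            charCodeAt chars pos = some 0x0D ∨ charCodeAt chars pos = some 0x2C := by
          rcases hcw with h2 | h2 | h2 | h2 | h2 | h2 <;> subst h2 <;>
            [exact Or.inl (by rw [hcode]; decide);
             exact Or.inr (Or.inl (by rw [hcode]; decide));
             exact Or.inr (Or.inr (Or.inl (by rw [hcode]; decide)));
             exact Or.inr (Or.inr (Or.inr (Or.inl (by rw [hcode]; decide))));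
             exact Or.inr (Or.inr (Or.inr (Or.inr (Or.inl (by rw [hcode]; decide)))));
             exact Or.inr (Or.inr (Or.inr (Or.inr (Or.inr (by rw [hcode]; decide)))))]
        rw [if_pos hws, if_neg hch, if_pos hcw]
        exact ih (pos + 1)
      · by_cases hch : c = '#'
        · have hws' : ¬ (charCodeAt chars pos = some 0xFEFF ∨ charCodeAt chars pos = some 0x09 ∨
              charCodeAt chars pos = some 0x20 ∨ charCodeAt chars pos = some 0x0A ∨
              charCodeAt chars pos = some 0x0D ∨ charCodeAt chars pos = some 0x2C) := by
            intro hws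
            apply hcw
            rcases hws with h2 | h2 | h2 | h2 | h2 | h2 <;>
              obtain ⟨_, _, c', hg', hcz'⟩ := charCodeAt_cases h2 <;>
              rw [hg'] at hg <;> injection hg with hgc <;> subst hgc <;>
              [exact Or.inl (char_of_code hcz' '\uFEFF' (by decide));
               exact Or.inr (Or.inl (char_of_code hcz' '\t' (by decide)));
               exact Or.inr (Or.inr (Or.inl (char_of_code hcz' ' ' (by decide))));
               exact Or.inr (Or.inr (Or.inr (Or.inl (char_of_code hcz' '\n' (by decide)))));
               exact Or.inr (Or.inr (Or.inr (Or.inr (Or.inl (char_of_code hcz' '\r' (by decide))))));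
               exact Or.inr (Or.inr (Or.inr (Or.inr (Or.inr (char_of_code hcz' ',' (by decide))))))]
          have hhash : charCodeAt chars pos = some 35 := by
            rw [hcode, hch]; decide
          rw [if_neg hws', if_pos hhash, if_pos hch]
          rw [ih]
          congr 1
          have hk : pos.toNat + 1 ≤ chars.length := by omega
          have hcast : (pos + 1 : Int) = ((pos.toNat + 1 : Nat) : Int) := by omega
          rw [hcast, min_orLen_eq_stopAt chars (pos.toNat + 1) hk,
              ← pawInner_eq chars hDom ((chars.length - pos).toNat + 1) (pos.toNat + 1) hk (by omega)]
        · have hws' : ¬ (charCodeAt chars pos = some 0xFEFF ∨ charCodeAt chars pos = some 0x09 ∨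
              charCodeAt chars pos = some 0x20 ∨ charCodeAt chars pos = some 0x0A ∨
              charCodeAt chars pos = some 0x0D ∨ charCodeAt chars pos = some 0x2C) := by
            intro hws
            apply hcw
            rcases hws with h2 | h2 | h2 | h2 | h2 | h2 <;>
              obtain ⟨_, _, c', hg', hcz'⟩ := charCodeAt_cases h2 <;>
              rw [hg'] at hg <;> injection hg with hgc <;> subst hgc <;>
              [exact Or.inl (char_of_code hcz' '\uFEFF' (by decide));
               exact Or.inr (Or.inl (char_of_code hcz' '\t' (by decide)));
               exact Or.inr (Or.inr (Or.inl (char_of_code hcz' ' ' (by decide))));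
               exact Or.inr (Or.inr (Or.inr (Or.inl (char_of_code hcz' '\n' (by decide)))));
               exact Or.inr (Or.inr (Or.inr (Or.inr (Or.inl (char_of_code hcz' '\r' (by decide))))));
               exact Or.inr (Or.inr (Or.inr (Or.inr (Or.inr (char_of_code hcz' ',' (by decide))))))]
          have hhash' : ¬ charCodeAt chars pos = some 35 := by
            rw [hcode]
            intro hsome
            injection hsome with h35
            exact hch (char_of_code h35 '#' (by decide))
          rw [if_neg hws', if_neg hhash', if_neg hch, if_neg hcw]
    · have hnone : charCodeAt chars pos = none := charCodeAt_none hin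
      rw [pawOuter, pawAlt, if_neg hin]
      by_cases hlt : pos < (chars.length : Int)
      · rw [if_pos hlt, hnone]
        simp
      · rw [if_neg hlt]

-- ===== VERDICT (by name: the statement is the Claim_ definition above) =====
theorem position_after_whitespace_spec : Claim_equal_position_after_whitespace := by
  intro body start_position hdom
  unfold Spec_position_after_whitespace position_after_whitespace position_after_whitespace_alt
  unfold Dom_position_after_whitespace at hdom
  simp only [Bool.and_eq_true] at hdom
  exact paw_main body.toList (by simpa [pvDomStr] using hdom.1) _ start_position
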